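-- pv_equiv track=rewrite | github.com/raga-rob/JPEGtoDNA | jpeg_to_dna_rotatoryEncoding_progressive_layered.py | bytes_to_quads
-- ===== SOURCE A (Python) =====
-- def bytes_to_quads(data):
--     """
--     Expand each byte into four 2-bit digits (most significant first).
--     Each 2-bit digit is an integer 0..3.
--     """
--     quads = []
--     for b in data:
--         quads.append((b >> 6) & 0x03)
--         quads.append((b >> 4) & 0x03)
--         quads.append((b >> 2) & 0x03)
--         quads.append(b & 0x03)
--     return quads
-- ===== SOURCE B (Python) =====
-- # Table-driven rewrite: one 256-entry lookup per byte instead of four shift/mask extractions.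
-- TABLE = [[(i >> 6) & 3, (i >> 4) & 3, (i >> 2) & 3, i & 3] for i in range(256)]
--
--
-- def bytes_to_quads(data):
--     quads = []
--     for b in data:
--         quads.extend(TABLE[b & 0xFF])
--     return quads
-- ===== Notes on version B (the rewrite author's own statement) =====
-- stated objective: idiomatic
-- what changed: Replaces the four per-byte shift-and-mask computations with a single lookup into a 256-entry table of precomputed quads, extended onto the result in one step.
import Mathlib
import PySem

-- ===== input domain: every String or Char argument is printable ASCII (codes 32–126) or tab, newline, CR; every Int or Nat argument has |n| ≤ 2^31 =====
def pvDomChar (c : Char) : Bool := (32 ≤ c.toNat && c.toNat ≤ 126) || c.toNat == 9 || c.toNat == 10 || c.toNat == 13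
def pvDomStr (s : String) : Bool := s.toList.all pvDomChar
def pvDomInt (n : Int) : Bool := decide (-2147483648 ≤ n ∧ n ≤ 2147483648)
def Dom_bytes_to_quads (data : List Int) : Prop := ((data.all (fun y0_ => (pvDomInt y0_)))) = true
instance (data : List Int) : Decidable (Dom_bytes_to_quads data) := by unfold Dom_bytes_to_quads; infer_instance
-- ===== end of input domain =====

-- B replaces the four per-byte shift/mask extractions with one lookup into a precomputed
-- 256-entry table of quads (idiomatic table-driven rewrite; same O(n) cost).

-- ===== PORT A =====
-- Python & → PySem.Int.band, Python >> → Lean >>> with a Nat shift (exact per PYSEM.md).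
def bytes_to_quads (data : List Int) : List Int :=
  data.foldl (fun quads (b : Int) =>
    ((((quads ++ [PySem.Int.band (b >>> (6 : Nat)) 3])
       ++ [PySem.Int.band (b >>> (4 : Nat)) 3])
       ++ [PySem.Int.band (b >>> (2 : Nat)) 3])
       ++ [PySem.Int.band b 3])) []

-- ===== PORT B =====
-- TABLE = [[(i>>6)&3, (i>>4)&3, (i>>2)&3, i&3] for i in range(256)]
def pvTable : List (List Int) :=
  (PySem.List.pyRange 0 256 1).map (fun (i : Int) =>
    [PySem.Int.band (i >>> (6 : Nat)) 3, PySem.Int.band (i >>> (4 : Nat)) 3,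
     PySem.Int.band (i >>> (2 : Nat)) 3, PySem.Int.band i 3])

-- quads.extend(TABLE[b & 0xFF]); the index b & 0xFF is always in range, so pyGetD's
-- default is never taken.
def bytes_to_quads_alt (data : List Int) : List Int :=
  data.foldl (fun quads (b : Int) =>
    quads ++ PySem.List.pyGetD pvTable (PySem.Int.band b 255) []) []

-- ===== PRECONDITION & SPEC =====
def Spec_bytes_to_quads (data : List Int) (out : List Int) : Prop := out = bytes_to_quads_alt data
instance (data : List Int) (out : List Int) : Decidable (Spec_bytes_to_quads data out) := by unfold Spec_bytes_to_quads; infer_instance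

-- ===== CLAIM (what is proved, stated in full; the proofs are below) =====
def Claim_equal_bytes_to_quads : Prop := ∀ (data : List Int), Dom_bytes_to_quads data → Spec_bytes_to_quads data (bytes_to_quads data)

-- ===== LEMMAS AND PROOFS =====

-- Python's  x & 3  is  x % 4  (exact on negatives: two's complement)
theorem pv_band_3 (a : Int) : PySem.Int.band a 3 = a % 4 := by
  unfold PySem.Int.band
  have ht : (3:Int).toNat = 3 := rfl
  by_cases h1 : 0 ≤ a
  · rw [if_pos h1, if_pos (show (0:Int) ≤ 3 by norm_num), ht]
    have h : a.toNat &&& 3 = a.toNat % 4 := Nat.and_two_pow_sub_one_eq_mod a.toNat 2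
    omega
  · rw [if_neg h1, if_pos (show (0:Int) ≤ 3 by norm_num), ht]
    have h2 : (-a - 1).toNat &&& 3 = (-a - 1).toNat % 4 :=
      Nat.and_two_pow_sub_one_eq_mod (-a - 1).toNat 2
    rw [Nat.and_comm]
    omega

-- Python's  x & 0xFF  is  x % 256
theorem pv_band_255 (a : Int) : PySem.Int.band a 255 = a % 256 := by
  unfold PySem.Int.band
  have ht : (255:Int).toNat = 255 := rfl
  by_cases h1 : 0 ≤ a
  · rw [if_pos h1, if_pos (show (0:Int) ≤ 255 by norm_num), ht]
    have h : a.toNat &&& 255 = a.toNat % 256 := Nat.and_two_pow_sub_one_eq_mod a.toNat 8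
    omega
  · rw [if_neg h1, if_pos (show (0:Int) ≤ 255 by norm_num), ht]
    have h2 : (-a - 1).toNat &&& 255 = (-a - 1).toNat % 256 :=
      Nat.and_two_pow_sub_one_eq_mod (-a - 1).toNat 8
    rw [Nat.and_comm]
    omega

-- the four 2-bit digits of b depend only on b % 256
theorem pv_quads_mod (b : Int) :
    [PySem.Int.band ((b % 256) >>> (6 : Nat)) 3, PySem.Int.band ((b % 256) >>> (4 : Nat)) 3,
     PySem.Int.band ((b % 256) >>> (2 : Nat)) 3, PySem.Int.band (b % 256) 3]
    = [PySem.Int.band (b >>> (6 : Nat)) 3, PySem.Int.band (b >>> (4 : Nat)) 3,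
       PySem.Int.band (b >>> (2 : Nat)) 3, PySem.Int.band b 3] := by
  simp only [pv_band_3, Int.shiftRight_eq_div_pow]
  norm_num
  omega

theorem pv_table_lookup (b : Int) :
    PySem.List.pyGetD pvTable (PySem.Int.band b 255) []
    = [PySem.Int.band (b >>> (6 : Nat)) 3, PySem.Int.band (b >>> (4 : Nat)) 3,
       PySem.Int.band (b >>> (2 : Nat)) 3, PySem.Int.band b 3] := by
  rw [pv_band_255]
  have h0 : (0 : Int) ≤ b % 256 := Int.emod_nonneg b (by norm_num)
  have h1 : b % 256 < 256 := Int.emod_lt_of_pos b (by norm_num)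
  have hk : b % 256 = ((b % 256).toNat : Int) := by omega
  have hlt : (b % 256).toNat < 256 := by omega
  have hrange : PySem.List.pyRange 0 256 1 = PySem.List.pyRange 0 ((256 : Nat) : Int) 1 := by
    norm_num
  rw [← pv_quads_mod, pvTable, hrange, hk]
  exact PySem.List.pyGetD_map_pyRange _ 256 _ _ hlt

theorem pv_fold_eq (data : List Int) (acc : List Int) :
    data.foldl (fun quads (b : Int) =>
      ((((quads ++ [PySem.Int.band (b >>> (6 : Nat)) 3])
         ++ [PySem.Int.band (b >>> (4 : Nat)) 3])
         ++ [PySem.Int.band (b >>> (2 : Nat)) 3])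
         ++ [PySem.Int.band b 3])) acc
    = data.foldl (fun quads (b : Int) =>
        quads ++ PySem.List.pyGetD pvTable (PySem.Int.band b 255) []) acc := by
  induction data generalizing acc with
  | nil => rfl
  | cons b rest ih =>
      simp only [List.foldl_cons]
      rw [ih, pv_table_lookup]
      simp

-- ===== VERDICT (by name: the statement is the Claim_ definition above) =====
theorem bytes_to_quads_spec : Claim_equal_bytes_to_quads := by
  intro data _
  unfold Spec_bytes_to_quads bytes_to_quads bytes_to_quads_alt
  exact pv_fold_eq data []
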